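-- pv_equiv track=rewrite | github.com/Yukend/adventofcode | 2015/day20/test.py | find_lowest_house_number
-- ===== SOURCE A (Python) =====
-- def find_lowest_house_number(target_presents):
--     # Create an array to track the number of presents at each house
--     houses = [0] * (target_presents // 10)
--
--     for elf in range(1, len(houses) + 1):
--         for house in range(elf - 1, len(houses), elf):
--             houses[house] += elf * 10
--
--     for house, presents in enumerate(houses):
--         if presents >= target_presents:
--             return house + 1  # House numbering starts from 1
--
--     return None
-- ===== SOURCE B (Python) =====
-- def find_lowest_house_number(target_presents):
--     # Scan houses 1..target_presents//10, computing each house's divisor sum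
--     # on the fly by trial division up to sqrt(house); no sieve array.
--     limit = target_presents // 10
--     for house in range(1, limit + 1):
--         total = 0
--         d = 1
--         while d * d <= house:
--             if house % d == 0:
--                 total += d
--                 q = house // d
--                 if q != d:
--                     total += q
--             d += 1
--         if total * 10 >= target_presents:
--             return house
--     return None
-- ===== Notes on version B (the rewrite author's own statement) =====
-- stated objective: alternative
-- what changed: Replaces A's elf-by-elf sieve over a presents array (plus a final enumerate scan) with a direct scan over the same range of candidate houses that computes each house's divisor sum on the fly by trial division up to sqrt(house) and returns at the first hit, using no auxiliary array.
import Mathlib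
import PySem

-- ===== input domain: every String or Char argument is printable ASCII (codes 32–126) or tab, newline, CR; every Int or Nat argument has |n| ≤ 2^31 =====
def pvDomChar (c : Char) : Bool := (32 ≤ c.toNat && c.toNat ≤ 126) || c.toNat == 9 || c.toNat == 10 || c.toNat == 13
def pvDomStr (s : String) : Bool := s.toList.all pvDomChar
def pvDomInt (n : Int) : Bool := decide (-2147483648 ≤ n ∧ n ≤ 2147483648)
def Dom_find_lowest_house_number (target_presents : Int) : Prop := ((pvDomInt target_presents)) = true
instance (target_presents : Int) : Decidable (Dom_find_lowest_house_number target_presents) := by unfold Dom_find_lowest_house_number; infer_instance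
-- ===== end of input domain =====

-- B replaces A's full elf-sieve over a presents array by a direct scan that
-- computes each house's divisor sum on the fly by trial division up to sqrt(house)
-- and stops at the first hit (alternative algorithm, no auxiliary array).

-- ===== PORT A =====
-- final loop: 'for house, presents in enumerate(houses): if presents >= target: return house + 1'
-- (the enumerate counter is carried as the extra parameter 'house')
def aScan (target : Int) (house : Int) : List Int → Option Int
  | [] => none
  | presents :: rest =>
    if presents ≥ target then some (house + 1) else aScan target (house + 1) rest

-- the Python list 'houses' is ported as an Array; in 'houses[house] += elf * 10' the
-- index is always in range (house ∈ range(elf-1, len(houses), elf)), so the total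
-- getD/setIfInBounds pair is exact there
def find_lowest_house_number (target_presents : Int) : Option Int :=
  let houses0 : Array Int := Array.replicate (PySem.Int.floordiv target_presents 10).toNat 0
  let houses :=
    (PySem.List.pyRange 1 ((houses0.size : Int) + 1) 1).foldl
      (fun hs elf =>
        (PySem.List.pyRange (elf - 1) ((hs.size : Int)) elf).foldl
          (fun hs2 house =>
            hs2.setIfInBounds house.toNat (hs2.getD house.toNat 0 + elf * 10))
          hs)
      houses0
  aScan target_presents 0 houses.toList

-- ===== PORT B =====
-- inner 'while d * d <= house' loop of Source B (fuel bounds the iteration count)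
def altDivLoop (house : Int) : Nat → Int → Int → Int
  | 0, _, total => total
  | fuel + 1, d, total =>
    if d * d ≤ house then
      altDivLoop house fuel (d + 1)
        (if PySem.Int.mod house d = 0 then
          total + d +
            (if PySem.Int.floordiv house d ≠ d then PySem.Int.floordiv house d else 0)
        else total)
    else total

-- 'for house in range(1, limit + 1): … return house' loop of Source B
def altScan (target : Int) : List Int → Option Int
  | [] => none
  | house :: rest =>
    let total := altDivLoop house (house.toNat + 1) 1 0
    if total * 10 ≥ target then some house else altScan target rest

def find_lowest_house_number_alt (target_presents : Int) : Option Int :=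
  let limit := PySem.Int.floordiv target_presents 10
  altScan target_presents (PySem.List.pyRange 1 (limit + 1) 1)

-- ===== PRECONDITION & SPEC =====
def Spec_find_lowest_house_number (target_presents : Int) (out : Option Int) : Prop := out = find_lowest_house_number_alt target_presents
instance (target_presents : Int) (out : Option Int) : Decidable (Spec_find_lowest_house_number target_presents out) := by unfold Spec_find_lowest_house_number; infer_instance

-- ===== CLAIM (what is proved, stated in full; the proofs are below) =====
def Claim_equal_find_lowest_house_number : Prop := ∀ (target_presents : Int), Dom_find_lowest_house_number target_presents → Spec_find_lowest_house_number target_presents (find_lowest_house_number target_presents)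

-- ===== LEMMAS AND PROOFS =====

-- sum of divisors
def dsum (n : Nat) : Nat := ∑ d ∈ n.divisors, d

-- reference search: first house in n, n+1, …, n+c-1 with divisor sum * 10 ≥ target
def firstHit (target : Int) : Nat → Nat → Option Int
  | 0, _ => none
  | c + 1, n => if (dsum n : Int) * 10 ≥ target then some (n : Int) else firstHit target c (n + 1)

-- ---- B side ----

-- the trial-division loop sums d + house/d over divisors d ≤ sqrt house
lemma altDivLoop_eq (n : Nat) : ∀ (fuel d : Nat) (total : Int), 1 ≤ d →
    n + 1 ≤ fuel + d * d →
    altDivLoop (n : Int) fuel (d : Int) total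
      = total + ∑ e ∈ Finset.Icc d n.sqrt,
          (if e ∣ n then ((e : Int) + if n / e ≠ e then ((n / e : Nat) : Int) else 0) else 0) := by
  intro fuel
  induction fuel with
  | zero =>
    intro d total hd hfuel
    have hlt : n.sqrt < d := by
      rw [Nat.sqrt_lt']
      nlinarith
    rw [Finset.Icc_eq_empty (by omega)]
    simp [altDivLoop]
  | succ fuel ih =>
    intro d total hd hfuel
    by_cases hdd : d * d ≤ n
    · have hguard : ((d : Int) * d ≤ (n : Int)) := by exact_mod_cast hdd
      have hdsqrt : d ≤ n.sqrt := by rw [Nat.le_sqrt']; nlinarith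
      rw [altDivLoop, if_pos hguard]
      have h1 : ((d : Int) + 1) = ((d + 1 : Nat) : Int) := by push_cast; ring
      rw [h1, ih (d + 1) _ (by omega) (by nlinarith)]
      rw [← Finset.insert_Icc_add_one_left_eq_Icc hdsqrt, Finset.sum_insert (by simp)]
      have hd0 : 0 < d := hd
      have hmod : PySem.Int.mod (n : Int) (d : Int) = ((n % d : Nat) : Int) := PySem.Int.mod_natCast n d
      have hdiv : PySem.Int.floordiv (n : Int) (d : Int) = ((n / d : Nat) : Int) := PySem.Int.floordiv_natCast n d
      rw [hmod, hdiv]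
      have hdvd_iff : (((n % d : Nat) : Int) = 0) ↔ d ∣ n := by
        rw [Nat.cast_eq_zero]
        exact Iff.symm Nat.dvd_iff_mod_eq_zero
      simp only [hdvd_iff, ne_eq, Nat.cast_inj]
      split_ifs <;> ring
    · have hguard : ¬ ((d : Int) * d ≤ (n : Int)) := by
        intro h; exact hdd (by exact_mod_cast h)
      rw [altDivLoop, if_neg hguard]
      have hlt : n.sqrt < d := by rw [Nat.sqrt_lt']; nlinarith
      rw [Finset.Icc_eq_empty (by omega)]
      simp

-- pairing divisors e ≤ √n with cofactors n/e gives the full divisor sum (in ℕ)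
lemma pair_nat (n : Nat) (hn : 1 ≤ n) :
    ∑ e ∈ Finset.Icc 1 n.sqrt, (if e ∣ n then (e + if n / e ≠ e then n / e else 0) else 0) = dsum n := by
  have hne : n ≠ 0 := by omega
  rw [← Finset.sum_filter]
  have hset : (Finset.Icc 1 n.sqrt).filter (· ∣ n) = n.divisors.filter (fun e => e * e ≤ n) := by
    ext e
    simp only [Finset.mem_filter, Finset.mem_Icc, Nat.mem_divisors]
    constructor
    · rintro ⟨⟨h1, h2⟩, h3⟩
      refine ⟨⟨h3, hne⟩, ?_⟩
      have := Nat.le_sqrt'.mp h2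
      nlinarith [this]
    · rintro ⟨⟨h1, _⟩, h2⟩
      have he0 : 0 < e := Nat.pos_of_dvd_of_pos h1 (by omega)
      refine ⟨⟨he0, Nat.le_sqrt'.mpr (by nlinarith)⟩, h1⟩
  rw [hset]
  rw [Finset.sum_add_distrib]
  have hsmall := Finset.sum_filter_add_sum_filter_not n.divisors (fun e => e * e ≤ n) (fun e => e)
  have hcof : ∑ e ∈ n.divisors.filter (fun e => e * e ≤ n), (if n / e ≠ e then n / e else 0)
      = ∑ e ∈ n.divisors.filter (fun e => ¬ e * e ≤ n), e := by
    rw [← Finset.sum_filter]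
    refine Finset.sum_nbij' (fun e => n / e) (fun e => n / e) ?_ ?_ ?_ ?_ ?_
    · intro e he
      simp only [Finset.mem_filter, Nat.mem_divisors] at he ⊢
      obtain ⟨⟨⟨hd, _⟩, hle⟩, hneq⟩ := he
      have he0 : 0 < e := Nat.pos_of_dvd_of_pos hd (by omega)
      have hmul : e * (n / e) = n := Nat.mul_div_cancel' hd
      have hdvd : n / e ∣ n := Nat.div_dvd_of_dvd hd
      have hlt : e * e < n := by
        rcases Nat.lt_or_ge (e * e) n with h | h
        · exact h
        · exfalso
          have hen : e * e = n := by omega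
          exact hneq (by rw [← hen, Nat.mul_div_cancel_left e he0])
      have hlt2 : e < n / e := by nlinarith
      exact ⟨⟨hdvd, hne⟩, not_le.mpr (by nlinarith)⟩
    · intro e he
      simp only [Finset.mem_filter, Nat.mem_divisors] at he ⊢
      obtain ⟨⟨hd, _⟩, hgt⟩ := he
      rw [not_le] at hgt
      have he0 : 0 < e := Nat.pos_of_dvd_of_pos hd (by omega)
      have hmul : e * (n / e) = n := Nat.mul_div_cancel' hd
      have hdvd : n / e ∣ n := Nat.div_dvd_of_dvd hd
      have hq1 : 1 ≤ n / e := Nat.one_le_div_iff he0 |>.mpr (Nat.le_of_dvd (by omega) hd)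
      have hqlt : n / e < e := by nlinarith
      have hinv : n / (n / e) = e := Nat.div_div_self hd hne
      refine ⟨⟨⟨hdvd, hne⟩, by nlinarith⟩, by rw [hinv]; omega⟩
    · intro e he
      simp only [Finset.mem_filter, Nat.mem_divisors] at he
      exact Nat.div_div_self he.1.1.1 hne
    · intro e he
      simp only [Finset.mem_filter, Nat.mem_divisors] at he
      exact Nat.div_div_self he.1.1 hne
    · intro e he; rfl
  rw [hcof]
  rw [dsum]
  omega

lemma sqrt_pair_sum (n : Nat) (hn : 1 ≤ n) :
    ∑ e ∈ Finset.Icc 1 n.sqrt,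
        (if e ∣ n then ((e : Int) + if n / e ≠ e then ((n / e : Nat) : Int) else 0) else 0)
      = (dsum n : Int) := by
  rw [← pair_nat n hn, Nat.cast_sum]
  refine Finset.sum_congr rfl ?_
  intro e _
  split_ifs <;> push_cast <;> ring

lemma altDivSum_eq (n : Nat) (hn : 1 ≤ n) :
    altDivLoop (n : Int) (n + 1) 1 0 = (dsum n : Int) := by
  have h := altDivLoop_eq n (n + 1) 1 0 le_rfl (by omega)
  rw [Nat.cast_one] at h
  rw [h]
  simpa using sqrt_pair_sum n hn

lemma altScan_eq (target : Int) : ∀ (c s : Nat), 1 ≤ s →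
    altScan target (PySem.List.pyRange (s : Int) ((s : Int) + (c : Int)) 1) = firstHit target c s := by
  intro c
  induction c with
  | zero =>
    intro s hs
    rw [show ((0 : Nat) : Int) = 0 by norm_num, add_zero, PySem.List.pyRange_one_eq_nil le_rfl]
    simp [altScan, firstHit]
  | succ c ih =>
    intro s hs
    rw [PySem.List.pyRange_one_cons (by push_cast; omega)]
    rw [altScan]
    have htonat : ((s : Int)).toNat = s := by omega
    have hsum : altDivLoop (s : Int) (((s : Int)).toNat + 1) 1 0 = (dsum s : Int) := by
      rw [htonat]
      exact altDivSum_eq s hs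
    simp only [hsum]
    rw [firstHit]
    by_cases hc : (dsum s : Int) * 10 ≥ target
    · rw [if_pos hc, if_pos hc]
    · rw [if_neg hc, if_neg hc]
      have h1 : ((s : Int) + 1) = ((s + 1 : Nat) : Int) := by push_cast; ring
      have h2 : ((s : Int) + ((c + 1 : Nat) : Int)) = ((s + 1 : Nat) : Int) + ((c : Nat) : Int) := by push_cast; ring
      rw [h1, h2]
      exact ih (s + 1) (by omega)

-- ---- A side ----

-- one inner pass adds v at each index of idxs (distinct, in range) exactly once
lemma foldl_bump (v : Int) : ∀ (idxs : List Int) (hs : Array Int), idxs.Nodup →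
    (∀ i ∈ idxs, 0 ≤ i ∧ i < (hs.size : Int)) →
    (idxs.foldl (fun hs2 house => hs2.setIfInBounds house.toNat (hs2.getD house.toNat 0 + v)) hs).size = hs.size ∧
    ∀ h : Nat, h < hs.size →
      (idxs.foldl (fun hs2 house => hs2.setIfInBounds house.toNat (hs2.getD house.toNat 0 + v)) hs).getD h 0
        = hs.getD h 0 + (if (h : Int) ∈ idxs then v else 0) := by
  intro idxs
  induction idxs with
  | nil => intro hs _ _; simp
  | cons i rest ih =>
    intro hs hnd hbound
    obtain ⟨hi0, hilen⟩ := hbound i (by simp)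
    have hito : i.toNat < hs.size := by omega
    simp only [List.foldl_cons]
    have hlen' : (hs.setIfInBounds i.toNat (hs.getD i.toNat 0 + v)).size = hs.size :=
      Array.size_setIfInBounds
    obtain ⟨ihlen, ihget⟩ := ih (hs.setIfInBounds i.toNat (hs.getD i.toNat 0 + v))
      (List.nodup_cons.mp hnd).2
      (by intro j hj; rw [hlen']; exact hbound j (by simp [hj]))
    refine ⟨by rw [ihlen, hlen'], ?_⟩
    intro h hh
    rw [ihget h (by omega)]
    have hgetset : (hs.setIfInBounds i.toNat (hs.getD i.toNat 0 + v)).getD h 0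
        = if i.toNat = h then hs.getD h 0 + v else hs.getD h 0 := by
      rw [Array.getD_eq_getD_getElem?, Array.getElem?_setIfInBounds]
      split_ifs with he
      · subst he; simp
      · rw [Array.getElem?_eq_getElem hh]
        rfl
    rw [hgetset]
    by_cases hcase : i.toNat = h
    · have hieq : i = (h : Int) := by omega
      have hnotmem : (h : Int) ∉ rest := by rw [← hieq]; exact (List.nodup_cons.mp hnd).1
      simp [hieq, hnotmem]
    · have hine : ¬ ((h : Int) = i) := by omega
      simp only [List.mem_cons, if_neg hcase]
      by_cases hm : (h : Int) ∈ rest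
      · simp [hm, hine]
      · simp [hm, hine]

-- membership in the stride-elf range is divisibility of h+1 by elf
lemma mem_stride_iff (elf : Int) (helf : 1 ≤ elf) (L : Nat) (h : Nat) (hh : h < L) :
    ((h : Int) ∈ PySem.List.pyRange (elf - 1) (L : Int) elf) ↔ elf ∣ ((h : Int) + 1) := by
  rw [PySem.List.mem_pyRange_iff_of_pos (by omega)]
  constructor
  · rintro ⟨h1, h2, h3⟩
    have heq : (h : Int) - (elf - 1) = ((h : Int) + 1) - elf := by ring
    rw [heq] at h3
    have := dvd_add h3 (dvd_refl elf)
    simpa using this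
  · intro hd
    have h3 : elf ∣ ((h : Int) - (elf - 1)) := by
      have heq : (h : Int) - (elf - 1) = ((h : Int) + 1) - elf := by ring
      rw [heq]
      exact dvd_sub hd (dvd_refl elf)
    have hle : elf ≤ (h : Int) + 1 := Int.le_of_dvd (by omega) hd
    exact ⟨by omega, by omega, h3⟩

lemma nodup_stride (elf : Int) (helf : 1 ≤ elf) (a b : Int) :
    (PySem.List.pyRange a b elf).Nodup := by
  rw [PySem.List.pyRange_of_pos a b (by omega)]
  refine List.Nodup.map ?_ List.nodup_range
  intro k1 k2 hk
  have h1 : elf * (k1 : Int) = elf * (k2 : Int) := by linarith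
  have h2 := mul_left_cancel₀ (by omega : elf ≠ 0) h1
  exact_mod_cast h2

-- after sieving elves 1..k, house h holds 10 * (sum of divisors of h+1 that are ≤ k)
lemma sieve_invariant (L : Nat) : ∀ (k : Nat),
    ((PySem.List.pyRange 1 ((k : Int) + 1) 1).foldl
      (fun hs elf =>
        (PySem.List.pyRange (elf - 1) ((hs.size : Int)) elf).foldl
          (fun hs2 house =>
            hs2.setIfInBounds house.toNat (hs2.getD house.toNat 0 + elf * 10))
          hs)
      (Array.replicate L (0 : Int))).size = L ∧
    ∀ h : Nat, h < L →
      ((PySem.List.pyRange 1 ((k : Int) + 1) 1).foldl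
        (fun hs elf =>
          (PySem.List.pyRange (elf - 1) ((hs.size : Int)) elf).foldl
            (fun hs2 house =>
              hs2.setIfInBounds house.toNat (hs2.getD house.toNat 0 + elf * 10))
            hs)
        (Array.replicate L (0 : Int))).getD h 0
        = ∑ e ∈ Finset.Icc 1 k, (if e ∣ (h + 1) then ((e : Int) * 10) else 0) := by
  intro k
  induction k with
  | zero =>
    rw [show ((0 : Nat) : Int) + 1 = 1 by norm_num, PySem.List.pyRange_one_eq_nil le_rfl]
    constructor
    · simp
    · intro h hh
      simp [Array.getD_eq_getD_getElem?, hh]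
  | succ k ih =>
    obtain ⟨ihlen, ihget⟩ := ih
    have hsplit : PySem.List.pyRange 1 (((k + 1 : Nat) : Int) + 1) 1
        = PySem.List.pyRange 1 ((k : Int) + 1) 1 ++ [(k : Int) + 1] := by
      have h := PySem.List.pyRange_one_succ_right (a := 1) (b := (k : Int) + 1) (by omega)
      push_cast
      push_cast at h
      exact h
    rw [hsplit, List.foldl_append]
    set hsk := (PySem.List.pyRange 1 ((k : Int) + 1) 1).foldl
        (fun hs elf =>
          (PySem.List.pyRange (elf - 1) ((hs.size : Int)) elf).foldl
            (fun hs2 house =>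
              hs2.setIfInBounds house.toNat (hs2.getD house.toNat 0 + elf * 10))
            hs)
        (Array.replicate L (0 : Int)) with hdef
    simp only [List.foldl_cons, List.foldl_nil]
    have hlenk : ((hsk.size : Int)) = (L : Int) := by exact_mod_cast ihlen
    rw [hlenk]
    have helf1 : (1 : Int) ≤ (k : Int) + 1 := by omega
    obtain ⟨blen, bget⟩ := foldl_bump (((k : Int) + 1) * 10)
      (PySem.List.pyRange ((k : Int) + 1 - 1) (L : Int) ((k : Int) + 1)) hsk
      (nodup_stride _ helf1 _ _)
      (by
        intro i hi
        rw [PySem.List.mem_pyRange_iff_of_pos (by omega)] at hi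
        rw [ihlen]
        exact ⟨by omega, hi.2.1⟩)
    refine ⟨by rw [blen, ihlen], ?_⟩
    intro h hh
    rw [bget h (by omega : h < hsk.size), ihget h hh]
    have hmem := mem_stride_iff ((k : Int) + 1) helf1 L h hh
    rw [Finset.sum_Icc_succ_top (by omega : 1 ≤ k + 1)]
    congr 1
    simp only [hmem]
    have hcast : (((k : Int) + 1) ∣ ((h : Int) + 1)) ↔ ((k + 1) ∣ (h + 1)) := by
      constructor
      · intro hd; exact_mod_cast hd
      · intro hd; exact_mod_cast hd
    simp only [hcast]
    split_ifs
    · push_cast; ring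
    · rfl

-- divisors of n ≤ L are all divisors of n
lemma dsum_cutoff (n L : Nat) (hn : 1 ≤ n) (hL : n ≤ L) :
    ∑ e ∈ Finset.Icc 1 L, (if e ∣ n then ((e : Int) * 10) else 0) = (dsum n : Int) * 10 := by
  have hfilter : (Finset.Icc 1 L).filter (· ∣ n) = n.divisors := by
    ext e
    simp only [Finset.mem_filter, Finset.mem_Icc, Nat.mem_divisors]
    constructor
    · rintro ⟨⟨h1, h2⟩, h3⟩; exact ⟨h3, by omega⟩
    · rintro ⟨h1, h2⟩
      have he0 : 0 < e := Nat.pos_of_dvd_of_pos h1 (by omega)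
      have := Nat.le_of_dvd (by omega) h1
      exact ⟨⟨he0, by omega⟩, h1⟩
  rw [← Finset.sum_filter, hfilter, dsum]
  push_cast
  rw [Finset.sum_mul]

lemma aScan_eq (target : Int) : ∀ (hs : List Int) (s : Nat),
    (∀ j : Nat, j < hs.length → hs.getD j 0 = (dsum (s + j + 1) : Int) * 10) →
    aScan target (s : Int) hs = firstHit target hs.length (s + 1) := by
  intro hs
  induction hs with
  | nil => intro s _; simp [aScan, firstHit]
  | cons x rest ih =>
    intro s hval
    rw [aScan]
    have hx : x = (dsum (s + 1) : Int) * 10 := by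
      have := hval 0 (by simp)
      simpa using this
    rw [List.length_cons, firstHit, hx]
    by_cases hc : (dsum (s + 1) : Int) * 10 ≥ target
    · rw [if_pos hc, if_pos hc]
      norm_num
    · rw [if_neg hc, if_neg hc]
      have hcast : ((s : Int) + 1) = ((s + 1 : Nat) : Int) := by push_cast; ring
      rw [hcast]
      exact ih (s + 1) (fun j hj => by
        have := hval (j + 1) (by simpa using Nat.succ_lt_succ hj)
        simpa [show s + 1 + j + 1 = s + (j + 1) + 1 by omega] using this)

-- ===== VERDICT (by name: the statement is the Claim_ definition above) =====
theorem find_lowest_house_number_spec : Claim_equal_find_lowest_house_number := by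
  intro target _
  unfold Spec_find_lowest_house_number find_lowest_house_number find_lowest_house_number_alt
  simp only [Array.size_replicate]
  set m := PySem.Int.floordiv target 10 with hm
  by_cases hpos : 0 < m
  · set L := m.toNat with hL
    have hmL : m = (L : Int) := by omega
    have hL1 : 1 ≤ L := by omega
    obtain ⟨slen, sget⟩ := sieve_invariant L L
    set houses := (PySem.List.pyRange 1 ((L : Int) + 1) 1).foldl
        (fun hs elf =>
          (PySem.List.pyRange (elf - 1) ((hs.size : Int)) elf).foldl
            (fun hs2 house =>
              hs2.setIfInBounds house.toNat (hs2.getD house.toNat 0 + elf * 10))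
            hs)
        (Array.replicate L (0 : Int)) with hhdef
    have hA : aScan target ((0 : Nat) : Int) houses.toList
        = firstHit target houses.toList.length (0 + 1) := by
      refine aScan_eq target houses.toList 0 ?_
      intro j hj
      rw [List.getD_eq_getElem?_getD, Array.getElem?_toList, ← Array.getD_eq_getD_getElem?]
      rw [Array.length_toList] at hj
      rw [sget j (by omega)]
      have := dsum_cutoff (j + 1) L (by omega) (by omega)
      simpa using this
    rw [show ((0 : Nat) : Int) = 0 by norm_num] at hA
    rw [hA, Array.length_toList, slen]
    -- B side
    have hB : altScan target (PySem.List.pyRange ((1 : Nat) : Int) (((1 : Nat) : Int) + (L : Int)) 1)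
        = firstHit target L 1 := altScan_eq target L 1 le_rfl
    rw [show (((1 : Nat) : Int)) = 1 by norm_num, show (1 : Int) + (L : Int) = m + 1 by omega] at hB
    rw [hB]
  · have hm0 : m.toNat = 0 := by omega
    rw [hm0]
    rw [show (((0 : Nat) : Int)) + 1 = 1 by norm_num, PySem.List.pyRange_one_eq_nil le_rfl]
    rw [PySem.List.pyRange_one_eq_nil (by omega : m + 1 ≤ 1)]
    simp [aScan, altScan]
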